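-- pv_equiv track=rewrite | github.com/HermelinLois/PMNS_w_extension | pmns_factory/pmns_general_structure.py | compute_max_add_coef
-- ===== SOURCE A (Python) =====
-- def compute_max_add_coef(n, k, _init_coefs):
--     _init_coefs = sorted(_init_coefs, key=lambda x: x[1])
--
--     def compute_coef(u):
--         if u == 0:
--             return 0
--         return sum(abs(c[0]) for c in _init_coefs[:-1]) + abs(_init_coefs[-1][0])*compute_coef(u-1)
--
--     u = 1
--     while k > u*(n-k)+2:
--         u += 1
--     return compute_coef(u)
-- ===== SOURCE B (Python) =====
-- def compute_max_add_coef(n, k, _init_coefs):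
--     # one pass: total |c0| and the last element with maximal second component
--     best = _init_coefs[0]
--     total = 0
--     for c in _init_coefs:
--         total += abs(c[0])
--         if best[1] <= c[1]:
--             best = c
--     a = abs(best[0])
--     S = total - a
--     d = n - k
--     # smallest u >= 1 with k <= u*d + 2, in closed form (ceiling division)
--     u = 1 if k <= d + 2 else -(-(k - 2) // d)
--     # geometric series S*(a^u-1)/(a-1) via pow
--     return S * u if a == 1 else S * (pow(a, u) - 1) // (a - 1)
-- ===== Notes on version B (the rewrite author's own statement) =====
-- stated objective: alternative
-- what changed: B replaces A's insertion sort + O(u)-deep linear-recurrence recursion + O(u) search loop by a single pass over the list (running total of |c0| and last element with maximal key), a closed-form ceiling division for u, and the geometric-series value S*(a^u-1)/(a-1) via pow; intended as faster (a timing run read 4.5x at the largest size both finished, but could not confirm the label since both time out when the result itself is astronomically large).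
import Mathlib
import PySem

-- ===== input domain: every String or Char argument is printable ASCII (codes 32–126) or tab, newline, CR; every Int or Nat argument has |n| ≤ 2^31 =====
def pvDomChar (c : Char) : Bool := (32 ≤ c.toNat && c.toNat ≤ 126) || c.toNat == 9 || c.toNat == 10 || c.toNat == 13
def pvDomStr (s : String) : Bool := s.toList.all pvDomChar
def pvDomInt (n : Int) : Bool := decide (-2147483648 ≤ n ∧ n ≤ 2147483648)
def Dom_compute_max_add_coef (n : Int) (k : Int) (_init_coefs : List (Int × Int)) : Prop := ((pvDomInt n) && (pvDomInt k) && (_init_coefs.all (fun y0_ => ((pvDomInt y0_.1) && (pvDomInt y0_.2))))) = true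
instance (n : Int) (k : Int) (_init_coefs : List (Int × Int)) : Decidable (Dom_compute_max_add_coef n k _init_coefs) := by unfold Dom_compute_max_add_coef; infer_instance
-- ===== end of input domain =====

-- B: one pass for (total, last-max element), closed-form u by ceiling division, and the
-- geometric-series closed form via pow — instead of A's sort + O(u) recursion + O(u) search loop.

-- ===== PORT A =====
-- inner 'compute_coef(u)' of A: recomputes the slice sum and the last element each call, as A does.
-- (the pyGetD default (0,0) is only reached for the empty list, which Pre_ excludes: Python raises IndexError there)
def pvCoefA (l : List (Int × Int)) : Nat → Int
  | 0 => 0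
  | u + 1 =>
      ((PySem.List.slice l none (some (-1))).map (fun c => |c.1|)).sum
        + |(PySem.List.pyGetD l (-1) (0, 0)).1| * pvCoefA l u

-- the 'while k > u*(n-k)+2: u += 1' loop; fuel makes it total (enough fuel under Pre_)
def pvFindU (n k : Int) : Nat → Int → Int
  | 0, u => u
  | fuel + 1, u => if k > u * (n - k) + 2 then pvFindU n k fuel (u + 1) else u

def compute_max_add_coef (n : Int) (k : Int) (_init_coefs : List (Int × Int)) : Int :=
  let s := PySem.List.sorted _init_coefs (fun x => x.2) false
  let u := pvFindU n k k.toNat 1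
  pvCoefA s u.toNat

-- ===== PORT B =====
-- on [] Python B raises IndexError (as does A); Pre_ excludes it, the port returns 0 there
def compute_max_add_coef_alt (n : Int) (k : Int) (_init_coefs : List (Int × Int)) : Int :=
  match _init_coefs with
  | [] => 0
  | c0 :: _ =>
      let st := _init_coefs.foldl
        (fun (st : (Int × Int) × Int) c => (if st.1.2 ≤ c.2 then c else st.1, st.2 + |c.1|))
        (c0, 0)
      let a := |st.1.1|
      let S := st.2 - a
      let d := n - k
      let u := if k ≤ d + 2 then 1 else -(PySem.Int.floordiv (-(k - 2)) d)
      if a = 1 then S * u else PySem.Int.floordiv (S * (a ^ u.toNat - 1)) (a - 1)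

-- ===== PRECONDITION & SPEC =====
-- Pre_ excludes the empty list (both Pythons raise IndexError) and the inputs with
-- n - k ≤ 0 ∧ k > (n-k)+2, on which A's while loop never terminates.
def Pre_compute_max_add_coef (n : Int) (k : Int) (_init_coefs : List (Int × Int)) : Prop :=
  _init_coefs ≠ [] ∧ (0 < n - k ∨ k ≤ (n - k) + 2)
instance (n : Int) (k : Int) (_init_coefs : List (Int × Int)) : Decidable (Pre_compute_max_add_coef n k _init_coefs) := by unfold Pre_compute_max_add_coef; infer_instance

def pvWitness_compute_max_add_coef : Int × Int × (List (Int × Int)) := (7, 4, [(3, 1), (-2, 5)])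

def Spec_compute_max_add_coef (n : Int) (k : Int) (_init_coefs : List (Int × Int)) (out : Int) : Prop := out = compute_max_add_coef_alt n k _init_coefs
instance (n : Int) (k : Int) (_init_coefs : List (Int × Int)) (out : Int) : Decidable (Spec_compute_max_add_coef n k _init_coefs out) := by unfold Spec_compute_max_add_coef; infer_instance

-- ===== CLAIM (what is proved, stated in full; the proofs are below) =====
def Claim_equal_compute_max_add_coef : Prop := ∀ (n : Int) (k : Int) (_init_coefs : List (Int × Int)), Dom_compute_max_add_coef n k _init_coefs → Pre_compute_max_add_coef n k _init_coefs → Spec_compute_max_add_coef n k _init_coefs (compute_max_add_coef n k _init_coefs)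

-- ===== LEMMAS AND PROOFS =====

-- B's "keep the later of two candidates when keys tie" step
def pvBestf (b c : Int × Int) : Int × Int := if b.2 ≤ c.2 then c else b

def pvBestOf? (l : List (Int × Int)) : Option (Int × Int) :=
  l.foldl (fun o c => match o with | none => some c | some b => some (pvBestf b c)) none

-- the linear recurrence with fixed coefficients
def pvCoef (S a : Int) : Nat → Int
  | 0 => 0
  | m + 1 => S + a * pvCoef S a m

theorem pvBestOf?_some (l : List (Int × Int)) (b : Int × Int) :
    l.foldl (fun o c => match o with | none => some c | some b => some (pvBestf b c)) (some b)
      = some (l.foldl pvBestf b) := by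
  induction l generalizing b with
  | nil => rfl
  | cons c t ih => simp [List.foldl, ih]

theorem pvPairFold (l : List (Int × Int)) (b : Int × Int) (t : Int) :
    l.foldl (fun (st : (Int × Int) × Int) c => (if st.1.2 ≤ c.2 then c else st.1, st.2 + |c.1|)) (b, t)
      = (l.foldl pvBestf b, t + (l.map (fun c => |c.1|)).sum) := by
  induction l generalizing b t with
  | nil => simp
  | cons c rest ih =>
    simp only [List.foldl, List.map, List.sum_cons, ih]
    refine Prod.ext rfl ?_
    unfold pvBestf
    ring

theorem pvInsertBy_ne_nil (x : Int × Int) (ys : List (Int × Int)) :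
    PySem.List.insertBy (fun a b => decide (a.2 < b.2)) x ys ≠ [] := by
  cases ys with
  | nil => simp [PySem.List.insertBy]
  | cons y t => simp only [PySem.List.insertBy]; split <;> simp

theorem pvInsertBy_nil (before : (Int × Int) → (Int × Int) → Bool) (x : Int × Int) :
    PySem.List.insertBy before x [] = [x] := rfl

theorem pvInsertBy_cons (before : (Int × Int) → (Int × Int) → Bool) (x y : Int × Int)
    (ys : List (Int × Int)) :
    PySem.List.insertBy before x (y :: ys)
      = if before x y then x :: y :: ys else y :: PySem.List.insertBy before x ys := rfl

theorem pvGetLast?_cons_of_ne_nil (a : Int × Int) (l : List (Int × Int)) (h : l ≠ []) :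
    (a :: l).getLast? = l.getLast? := by
  cases l with
  | nil => exact absurd rfl h
  | cons b t => exact List.getLast?_cons_cons ..

theorem pvInsertBy_getLast? (ys : List (Int × Int)) (x : Int × Int)
    (hs : ys.Pairwise (fun a b => a.2 ≤ b.2)) (m : Int × Int) (hm : ys.getLast? = some m) :
    (PySem.List.insertBy (fun a b => decide (a.2 < b.2)) x ys).getLast? = some (pvBestf m x) := by
  induction ys with
  | nil => simp at hm
  | cons y t ih =>
    cases t with
    | nil =>
      have hym : y = m := by simpa using hm
      subst hym
      rw [pvInsertBy_cons, pvInsertBy_nil]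
      by_cases h : x.2 < y.2
      · simp [h, pvBestf, not_le.mpr h]
      · simp [h, pvBestf, not_lt.mp h]
    | cons y' t' =>
      have hm' : (y' :: t').getLast? = some m := by
        rw [← hm]; exact (List.getLast?_cons_cons ..).symm
      have hpair : (y' :: t').Pairwise (fun a b => a.2 ≤ b.2) := hs.tail
      have hym : y.2 ≤ m.2 := by
        have : m ∈ y' :: t' := List.mem_of_getLast? hm'
        exact (List.pairwise_cons.mp hs).1 m this
      rw [pvInsertBy_cons]
      by_cases h : x.2 < y.2
      · -- x goes in front; last stays m and bestf m x = m
        have hxm : ¬ m.2 ≤ x.2 := by omega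
        rw [if_pos (by simpa using h)]
        rw [List.getLast?_cons_cons, List.getLast?_cons_cons, hm']
        simp [pvBestf, hxm]
      · rw [if_neg (by simpa using h)]
        have hne := pvInsertBy_ne_nil x (y' :: t')
        rw [pvGetLast?_cons_of_ne_nil _ _ hne]
        exact ih hpair hm'

theorem pvSorted_getLast? (l : List (Int × Int)) :
    (PySem.List.sorted l (fun x => x.2) false).getLast? = pvBestOf? l := by
  induction l using List.reverseRecOn with
  | nil => rfl
  | append_singleton xs x ih =>
    have hstep : PySem.List.sorted (xs ++ [x]) (fun c => c.2) false
        = PySem.List.insertBy (fun a b => decide (a.2 < b.2)) x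
            (PySem.List.sorted xs (fun c => c.2) false) := by
      rw [PySem.List.sorted_eq_foldl_insertBy, PySem.List.sorted_eq_foldl_insertBy,
        List.foldl_append]
      rfl
    have hbstep : pvBestOf? (xs ++ [x])
        = match pvBestOf? xs with | none => some x | some b => some (pvBestf b x) := by
      unfold pvBestOf?
      rw [List.foldl_append]
      rfl
    cases hxs : pvBestOf? xs with
    | none =>
      have hnil : xs = [] := by
        cases xs with
        | nil => rfl
        | cons c t =>
          exfalso
          unfold pvBestOf? at hxs
          simp only [List.foldl] at hxs
          rw [pvBestOf?_some] at hxs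
          simp at hxs
      subst hnil
      simp [PySem.List.sorted, PySem.List.insertBy, pvBestOf?, List.foldl]
    | some m =>
      rw [hstep, hbstep]
      have hlast : (PySem.List.sorted xs (fun c => c.2) false).getLast? = some m := by
        rw [ih, hxs]
      have hpair : (PySem.List.sorted xs (fun c => c.2) false).Pairwise (fun a b => a.2 ≤ b.2) :=
        PySem.List.sorted_pairwise xs (fun c => c.2)
      rw [pvInsertBy_getLast? _ x hpair m hlast, hxs]

-- A's inner recursion in terms of the fixed S and a
theorem pvCoefA_eq_pvCoef (l : List (Int × Int)) (h : l ≠ []) (m : Nat) :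
    pvCoefA l m = pvCoef ((l.dropLast.map (fun c => |c.1|)).sum) (|(l.getLast h).1|) m := by
  induction m with
  | zero => rfl
  | succ m ih =>
    simp only [pvCoefA, pvCoef, ih, PySem.List.slice_to_neg_one,
      PySem.List.pyGetD_neg_one l (0, 0) h]

theorem pvCoef_one (S : Int) (m : Nat) : pvCoef S 1 m = S * m := by
  induction m with
  | zero => simp [pvCoef]
  | succ m ih => simp [pvCoef, ih]; ring

theorem pvCoef_mul (S a : Int) (m : Nat) : pvCoef S a m * (a - 1) = S * (a ^ m - 1) := by
  induction m with
  | zero => simp [pvCoef]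
  | succ m ih =>
    simp only [pvCoef, pow_succ]
    linear_combination a * ih

theorem pvCoef_closed (S a : Int) (ha : a ≠ 1) (m : Nat) :
    pvCoef S a m = PySem.Int.floordiv (S * (a ^ m - 1)) (a - 1) := by
  have hb : a - 1 ≠ 0 := by omega
  rw [← pvCoef_mul S a m]
  show _ = (pvCoef S a m * (a - 1)).fdiv (a - 1)
  rw [Int.mul_fdiv_cancel _ hb]

-- the while loop reaches the closed-form u
theorem pvFindU_eq (n k uB : Int) (hd : 0 < n - k)
    (hlow : (uB - 1) * (n - k) < k - 2) (hhigh : k - 2 ≤ uB * (n - k)) :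
    ∀ (fuel : Nat) (u : Int), 1 ≤ u → u ≤ uB → uB ≤ u + fuel → pvFindU n k fuel u = uB := by
  intro fuel
  induction fuel with
  | zero => intro u h1 h2 h3; simp only [pvFindU]; omega
  | succ f ih =>
    intro u h1 h2 h3
    simp only [pvFindU]
    by_cases hc : k > u * (n - k) + 2
    · have hlt : u < uB := by
        by_contra hge
        have : u = uB := by omega
        subst this; omega
      rw [if_pos hc]
      exact ih (u + 1) (by omega) (by omega) (by omega)
    · rw [if_neg hc]
      have : uB - 1 < u := by
        by_contra hge
        have h4 : u ≤ uB - 1 := by omega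
        have := mul_le_mul_of_nonneg_right h4 (le_of_lt hd)
        omega
      omega

theorem pvU_pos (n k : Int) (hpre : 0 < n - k ∨ k ≤ (n - k) + 2) :
    1 ≤ (if k ≤ (n - k) + 2 then 1 else -(PySem.Int.floordiv (-(k - 2)) (n - k))) := by
  split
  · exact le_rfl
  · rename_i h
    have hd : 0 < n - k := by
      rcases hpre with h' | h'
      · exact h'
      · omega
    have hiff := (PySem.Int.neg_floordiv_neg_eq_iff_of_pos
      (a := k - 2) (b := n - k) (q := -(PySem.Int.floordiv (-(k - 2)) (n - k))) hd).mp rfl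
    nlinarith [hiff.1, hiff.2]

theorem pvU_eq (n k : Int) (hpre : 0 < n - k ∨ k ≤ (n - k) + 2) :
    pvFindU n k k.toNat 1
      = (if k ≤ (n - k) + 2 then 1 else -(PySem.Int.floordiv (-(k - 2)) (n - k))) := by
  by_cases h : k ≤ (n - k) + 2
  · rw [if_pos h]
    cases hf : k.toNat with
    | zero => rfl
    | succ f => simp only [pvFindU]; rw [if_neg (by omega)]
  · rw [if_neg h]
    have hd : 0 < n - k := by
      rcases hpre with h' | h'
      · exact h'
      · omega
    set uB := -(PySem.Int.floordiv (-(k - 2)) (n - k))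
    obtain ⟨hlow, hhigh⟩ := (PySem.Int.neg_floordiv_neg_eq_iff_of_pos
      (a := k - 2) (b := n - k) (q := uB) hd).mp rfl
    have h1 : 1 ≤ uB := by nlinarith
    have hle : uB ≤ k - 2 := by nlinarith
    exact pvFindU_eq n k uB hd hlow hhigh k.toNat 1 le_rfl (by nlinarith) (by omega)

-- ===== VERDICT (by name: the statement is the Claim_ definition above) =====
theorem compute_max_add_coef_spec : Claim_equal_compute_max_add_coef := by
  intro n k l _hdom hpre
  obtain ⟨hne, hterm⟩ := hpre
  unfold Spec_compute_max_add_coef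
  obtain ⟨c0, rest, rfl⟩ := List.exists_cons_of_ne_nil hne
  simp only [compute_max_add_coef, compute_max_add_coef_alt]
  rw [pvPairFold, zero_add]
  set s := PySem.List.sorted (c0 :: rest) (fun x => x.2) false with hs
  have hsne : s ≠ [] := by
    rw [hs]
    intro h0
    simpa using (PySem.List.sorted_eq_nil_iff _ _ _).mp h0
  have hbest : s.getLast? = some ((c0 :: rest).foldl pvBestf c0) := by
    rw [hs, pvSorted_getLast?]
    unfold pvBestOf?
    simp only [List.foldl]
    rw [pvBestOf?_some]
    have h0 : pvBestf c0 c0 = c0 := by simp [pvBestf]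
    rw [h0]
  have hbesteq : s.getLast hsne = (c0 :: rest).foldl pvBestf c0 := by
    have h2 := List.getLast?_eq_some_getLast (l := s) hsne
    rw [h2] at hbest
    exact Option.some.inj hbest
  have hsum : (s.map (fun c => |c.1|)).sum = ((c0 :: rest).map (fun c => |c.1|)).sum :=
    List.Perm.sum_eq ((PySem.List.sorted_perm _ _ _).map _)
  have hsplit : (s.dropLast.map (fun c => |c.1|)).sum
      = ((c0 :: rest).map (fun c => |c.1|)).sum - |(s.getLast hsne).1| := by
    have hcat : s.dropLast ++ [s.getLast hsne] = s := List.dropLast_concat_getLast hsne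
    have h3 : ((s.dropLast ++ [s.getLast hsne]).map (fun c => |c.1|)).sum
        = (s.map (fun c => |c.1|)).sum := by rw [hcat]
    simp only [List.map_append, List.sum_append, List.map_cons, List.map_nil,
      List.sum_cons, List.sum_nil] at h3
    omega
  rw [pvU_eq n k hterm]
  rw [pvCoefA_eq_pvCoef s hsne, hsplit, hbesteq]
  set a : Int := |((c0 :: rest).foldl pvBestf c0).1| with ha
  set S : Int := ((c0 :: rest).map (fun c => |c.1|)).sum - a with hS
  set u : Int := (if k ≤ (n - k) + 2 then 1 else -(PySem.Int.floordiv (-(k - 2)) (n - k))) with hu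
  by_cases h1 : a = 1
  · rw [if_pos h1, h1, pvCoef_one]
    have hup := pvU_pos n k hterm
    rw [← hu] at hup
    rw [Int.toNat_of_nonneg (by omega)]
  · rw [if_neg h1, pvCoef_closed S a h1]
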